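-- pv_equiv track=rewrite | github.com/5P2RS5/Python_for_infra | programmers/Lv1/17681.py | solution
-- ===== SOURCE A (Python) =====
-- def solution(n, arr1, arr2):
--     answer = []
--     for j, k in zip(arr1, arr2):
--         s = str(bin(j|k)[2:])
--         s = s.rjust(n, '0')
--         s = s.replace('1', '#')
--         s = s.replace('0', ' ')
--         answer.append(s)
--
--     return answer
-- ===== SOURCE B (Python) =====
-- def solution(n, arr1, arr2):
--     answer = []
--     for j, k in zip(arr1, arr2):
--         v = j | k
--         row = ''
--         while v:
--             row = ('#' if v & 1 else ' ') + row
--             v >>= 1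
--         answer.append((row or ' ').rjust(n))
--     return answer
-- ===== Notes on version B (the rewrite author's own statement) =====
-- stated objective: alternative
-- what changed: Each row is built by a numeric LSB-first bit-extraction loop (v & 1 / v >>= 1, prepending '#'/' ' characters, then space-padding with rjust) instead of A's bin()/rjust('0')/replace string pipeline; Pre_ excludes rows where j|k is negative (there the slice bin(j|k)[2:] leaves a stray 'b' from '-0b...', and B's while-v loop does not terminate).
-- outside the precondition, e.g. on solution(3, [-1], [0]): A returns [' b#'], B does not finish within the time limit
import Mathlib
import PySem

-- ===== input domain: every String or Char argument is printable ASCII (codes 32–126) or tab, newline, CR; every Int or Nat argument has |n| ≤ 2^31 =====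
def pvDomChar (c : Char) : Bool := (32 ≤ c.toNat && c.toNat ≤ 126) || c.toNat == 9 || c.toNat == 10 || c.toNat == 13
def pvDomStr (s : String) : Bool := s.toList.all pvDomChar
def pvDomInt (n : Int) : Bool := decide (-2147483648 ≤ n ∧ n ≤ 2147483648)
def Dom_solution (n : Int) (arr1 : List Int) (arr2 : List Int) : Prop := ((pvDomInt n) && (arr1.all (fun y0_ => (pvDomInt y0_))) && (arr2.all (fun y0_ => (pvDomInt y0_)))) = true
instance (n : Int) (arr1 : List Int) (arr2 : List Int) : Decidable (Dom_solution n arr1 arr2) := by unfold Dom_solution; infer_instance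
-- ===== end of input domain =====

-- B builds each row by a numeric LSB-first bit-extraction loop (v & 1 / v >>= 1,
-- prepending '#'/' ', then space padding) instead of A's bin()/rjust('0')/replace
-- string pipeline; same output on the stated domain, alternative algorithm.

-- ===== PORT A =====

-- binary digits of a positive number, as bin() renders them (MSB first); [] for 0
def natBinCore (m : Nat) : List Char :=
  if h : m = 0 then []
  else natBinCore (m / 2) ++ [if m % 2 = 1 then '1' else '0']
decreasing_by exact Nat.div_lt_self (Nat.pos_of_ne_zero h) one_lt_two

-- bin(v)[2:] : for v ≥ 0 the digit string ("0" for 0); for v < 0 the slice of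
-- '-0b...' keeps 'b' + the digits of |v|
def binSlice (v : Int) : List Char :=
  if v < 0 then 'b' :: natBinCore v.natAbs
  else if v.toNat = 0 then ['0'] else natBinCore v.toNat

-- s.rjust(n, '0') (no padding when n ≤ len(s), as in Python; negative n pads nothing)
def rjustZero (n : Int) (s : List Char) : List Char :=
  List.replicate (n.toNat - s.length) '0' ++ s

-- s.replace(a, b) for single-character a, b
def replChar (a b : Char) (s : List Char) : List Char :=
  s.map (fun c => if c = a then b else c)

def solution (n : Int) (arr1 : List Int) (arr2 : List Int) : List String :=
  (arr1.zip arr2).map (fun jk =>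
    String.mk (replChar '0' ' ' (replChar '1' '#'
      (rjustZero n (binSlice (Int.lor jk.1 jk.2))))))

-- ===== PORT B =====

-- the `while v:` loop of B, prepending '#'/' ' per low bit and shifting right;
-- Python's loop terminates only for v ≥ 0 (Pre_ guarantees that), so the guard
-- here is 0 < v: for v ≤ 0 the loop body is never entered / never claimed
def rowLoop (v : Int) (row : List Char) : List Char :=
  if _h : 0 < v then
    rowLoop (Int.shiftRight v 1) ((if Int.land v 1 = 1 then '#' else ' ') :: row)
  else row
termination_by v.toNat
decreasing_by
  have hm : v = ((v.toNat : Nat) : Int) := by omega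
  rw [hm]
  show (((v.toNat >>> 1 : Nat) : Int)).toNat < v.toNat
  simp [Nat.shiftRight_one]
  omega

def solution_alt (n : Int) (arr1 : List Int) (arr2 : List Int) : List String :=
  (arr1.zip arr2).map (fun jk =>
    let s := rowLoop (Int.lor jk.1 jk.2) []       -- the while loop, row = '' initially
    let row := if s.isEmpty then [' '] else s     -- (row or ' ')
    String.mk (List.replicate (n.toNat - row.length) ' ' ++ row))  -- .rjust(n)

-- ===== PRECONDITION & SPEC =====
-- Pre_ excludes inputs with a paired element negative: there A's bin(j|k)[2:]
-- slicing leaves a stray 'b' (an artifact of slicing '-0b...'), and B's own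
-- `while v:` loop does not terminate for negative v.
def Pre_solution (n : Int) (arr1 : List Int) (arr2 : List Int) : Prop :=
  ∀ p ∈ arr1.zip arr2, 0 ≤ p.1 ∧ 0 ≤ p.2
instance (n : Int) (arr1 : List Int) (arr2 : List Int) : Decidable (Pre_solution n arr1 arr2) := by unfold Pre_solution; infer_instance

def pvWitness_solution : Int × List Int × List Int := (5, [9, 20, 28, 18, 11], [30, 1, 21, 17, 28])

def Spec_solution (n : Int) (arr1 : List Int) (arr2 : List Int) (out : List String) : Prop := out = solution_alt n arr1 arr2
instance (n : Int) (arr1 : List Int) (arr2 : List Int) (out : List String) : Decidable (Spec_solution n arr1 arr2 out) := by unfold Spec_solution; infer_instance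

-- ===== CLAIM =====
def Claim_equal_solution : Prop := ∀ (n : Int) (arr1 : List Int) (arr2 : List Int), Dom_solution n arr1 arr2 → Pre_solution n arr1 arr2 → Spec_solution n arr1 arr2 (solution n arr1 arr2)

-- ===== LEMMAS AND PROOFS =====

-- the character substitution performed by A's two replaces
def subst (c : Char) : Char := if c = '1' then '#' else if c = '0' then ' ' else c

theorem repl_repl (l : List Char) :
    replChar '0' ' ' (replChar '1' '#' l) = l.map subst := by
  unfold replChar
  rw [List.map_map]
  apply List.map_congr_left
  intro c _
  by_cases h1 : c = '1'
  · simp [Function.comp, h1, subst]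
  · by_cases h0 : c = '0' <;> simp [Function.comp, h1, h0, subst]

-- B's bit loop produces exactly A's digit string after the substitution
theorem rowLoop_eq (m : Nat) (cur : List Char) :
    rowLoop (m : Int) cur = (natBinCore m).map subst ++ cur := by
  induction m using Nat.strong_induction_on generalizing cur with
  | _ m ih =>
    by_cases h : m = 0
    · subst h
      rw [rowLoop, dif_neg (by omega), natBinCore]
      simp
    · rw [rowLoop, dif_pos (by omega : (0:Int) < (m:Int))]
      have hshift : Int.shiftRight (m : Int) 1 = ((m / 2 : Nat) : Int) := by
        show ((m >>> 1 : Nat) : Int) = ((m / 2 : Nat) : Int)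
        rw [Nat.shiftRight_one]
      have hland : Int.land (m : Int) 1 = ((m &&& 1 : Nat) : Int) := rfl
      rw [hshift, ih (m / 2) (Nat.div_lt_self (Nat.pos_of_ne_zero h) one_lt_two)]
      conv_rhs => rw [natBinCore, dif_neg h]
      rw [List.map_append, List.append_assoc]
      congr 2
      rw [hland, Nat.and_one_is_mod]
      by_cases hb : m % 2 = 1
      · rw [if_pos (by omega : ((m % 2 : Nat) : Int) = 1), if_pos hb]
        decide
      · rw [if_neg (by omega : ¬ ((m % 2 : Nat) : Int) = 1), if_neg hb]
        decide

theorem natBinCore_ne_nil (m : Nat) (h : m ≠ 0) : natBinCore m ≠ [] := by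
  rw [natBinCore, dif_neg h]
  simp

-- one row: A's pipeline equals B's loop + (row or ' ') + rjust(n), for m = j|k ≥ 0
theorem row_eq (n : Int) (m : Nat) :
    replChar '0' ' ' (replChar '1' '#'
        (rjustZero n (if m = 0 then ['0'] else natBinCore m)))
      = List.replicate
          (n.toNat - (if (rowLoop (m : Int) []).isEmpty then [' ']
                      else rowLoop (m : Int) []).length) ' '
          ++ (if (rowLoop (m : Int) []).isEmpty then [' '] else rowLoop (m : Int) []) := by
  rw [rowLoop_eq m [], List.append_nil]
  by_cases h : m = 0
  · subst h
    rw [natBinCore]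
    simp [rjustZero, repl_repl, List.map_append, subst]
  · have hne : (natBinCore m).map subst ≠ [] := by
      simpa using natBinCore_ne_nil m h
    rw [if_neg h, repl_repl, rjustZero, List.map_append, List.map_replicate]
    rw [if_neg (by simpa [List.isEmpty_iff] using hne)]
    simp [subst]

-- ===== VERDICT =====
theorem solution_spec : Claim_equal_solution := by
  intro n arr1 arr2 _ hpre
  unfold Spec_solution solution solution_alt
  apply List.map_congr_left
  intro jk hmem
  obtain ⟨j, k⟩ := jk
  obtain ⟨hj, hk⟩ := hpre (j, k) hmem
  obtain ⟨a, rfl⟩ : ∃ a : Nat, j = (a : Int) := ⟨j.toNat, by omega⟩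
  obtain ⟨b, rfl⟩ : ∃ b : Nat, k = (b : Int) := ⟨k.toNat, by omega⟩
  have hlor : Int.lor (a : Int) (b : Int) = ((a ||| b : Nat) : Int) := rfl
  have hbin : binSlice ((a ||| b : Nat) : Int)
      = (if (a ||| b) = 0 then ['0'] else natBinCore (a ||| b)) := by
    rw [binSlice, if_neg (by omega)]
    simp
  rw [hlor]
  simp only [hbin]
  exact congrArg String.mk (row_eq n (a ||| b))
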